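-- pv_equiv track=rewrite | github.com/Deeksha11-S/autonomous-research-agent | data_alchemist.py | _parse_sources_from_text
-- ===== SOURCE A (Python) =====
-- from typing import List, Dict, Any, Tuple
--
-- def _parse_sources_from_text(text: str) -> List[Dict[str, Any]]:
--     """Parse sources from LLM response text"""
--     sources = []
--
--     lines = text.strip().split('\n')
--     current_source = {}
--
--     for line in lines:
--         line = line.strip()
--
--         if line.startswith('- Type:'):
--             if current_source:
--                 sources.append(current_source)
--             current_source = {"type": line.replace('- Type:', '').strip()}
--
--         elif line.startswith('Description:'):
--             current_source["description"] = line.replace('Description:', '').strip()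
--
--         elif line.startswith('URL/Identifier:'):
--             current_source["url"] = line.replace('URL/Identifier:', '').strip()
--
--         elif line.startswith('Accessibility:'):
--             current_source["accessibility"] = line.replace('Accessibility:', '').strip()
--
--         elif line.startswith('Relevance:'):
--             current_source["relevance"] = line.replace('Relevance:', '').strip()
--
--     if current_source:
--         sources.append(current_source)
--
--     return sources
-- ===== SOURCE B (Python) =====
-- def _parse_sources_from_text(text):
--     """Parse sources from LLM response text (two-pass: group lines into blocks, then parse each block)"""
--     lines = [l.strip() for l in text.strip().split('\n')]
--
--     # pass 1: partition lines into blocks; a new block starts at each '- Type:' line,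
--     # lines before the first '- Type:' form the initial block
--     blocks = [[]]
--     for l in lines:
--         if l.startswith('- Type:'):
--             blocks.append([l])
--         else:
--             blocks[-1].append(l)
--
--     fields = [('- Type:', 'type'),
--               ('Description:', 'description'),
--               ('URL/Identifier:', 'url'),
--               ('Accessibility:', 'accessibility'),
--               ('Relevance:', 'relevance')]
--
--     # pass 2: map each block to a dict; keep only non-empty dicts
--     result = []
--     for block in blocks:
--         d = {}
--         for l in block:
--             for prefix, key in fields:
--                 if l.startswith(prefix):
--                     d[key] = l.replace(prefix, '').strip()
--                     break
--         if d:
--             result.append(d)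
--     return result
-- ===== Notes on version B (the rewrite author's own statement) =====
-- stated objective: alternative
-- what changed: Replaced A's single stateful scan (mutable current_source flushed on each '- Type:' line) by a two-pass decomposition: first partition the stripped lines into blocks opened at each '- Type:' line (leading lines form the initial block), then map each block to a dict via a prefix-to-key table with first-match-wins, keeping only non-empty dicts.
import Mathlib
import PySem

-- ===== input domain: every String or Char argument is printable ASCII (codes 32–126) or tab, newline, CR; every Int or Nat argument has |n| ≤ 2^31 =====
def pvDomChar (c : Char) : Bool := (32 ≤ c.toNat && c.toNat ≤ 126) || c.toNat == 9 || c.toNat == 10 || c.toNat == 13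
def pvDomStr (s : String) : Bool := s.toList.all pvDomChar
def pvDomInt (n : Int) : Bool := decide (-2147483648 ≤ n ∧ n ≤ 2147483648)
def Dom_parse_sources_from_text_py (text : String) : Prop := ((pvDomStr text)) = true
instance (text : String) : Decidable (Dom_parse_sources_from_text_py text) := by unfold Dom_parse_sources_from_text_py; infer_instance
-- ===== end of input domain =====

-- B re-decomposes A's single stateful scan into two passes (group lines into blocks, then parse each
-- block via a prefix→key table); same results, objective: alternative decomposition, no speed claim.

-- ===== PORT A =====
-- one fold step of A's for-loop; state = (sources so far, current_source)
def pvStepA (st : List (List (String × String)) × PySem.Dict String String) (line : String) :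
    List (List (String × String)) × PySem.Dict String String :=
  let line := PySem.Str.strip line
  if PySem.Str.startswith line "- Type:" then
    ((if st.2.items ≠ [] then st.1 ++ [st.2.items] else st.1),
     PySem.Dict.insert PySem.Dict.empty "type" (PySem.Str.strip (PySem.Str.replace line "- Type:" "")))
  else if PySem.Str.startswith line "Description:" then
    (st.1, st.2.insert "description" (PySem.Str.strip (PySem.Str.replace line "Description:" "")))
  else if PySem.Str.startswith line "URL/Identifier:" then
    (st.1, st.2.insert "url" (PySem.Str.strip (PySem.Str.replace line "URL/Identifier:" "")))
  else if PySem.Str.startswith line "Accessibility:" then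
    (st.1, st.2.insert "accessibility" (PySem.Str.strip (PySem.Str.replace line "Accessibility:" "")))
  else if PySem.Str.startswith line "Relevance:" then
    (st.1, st.2.insert "relevance" (PySem.Str.strip (PySem.Str.replace line "Relevance:" "")))
  else st

def parse_sources_from_text_py (text : String) : List (List (String × String)) :=
  let lines := (PySem.Str.split? (PySem.Str.strip text) "\n").getD []
  let r := lines.foldl pvStepA ([], PySem.Dict.empty)
  if r.2.items ≠ [] then r.1 ++ [r.2.items] else r.1

-- ===== PORT B =====
def pvFields : List (String × String) :=
  [("- Type:", "type"), ("Description:", "description"), ("URL/Identifier:", "url"),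
   ("Accessibility:", "accessibility"), ("Relevance:", "relevance")]

-- pass 1 step: a '- Type:' line opens a new block, any other line joins the current (last) block
def pvGroupStep (acc : List (List String) × List String) (l : String) :
    List (List String) × List String :=
  if PySem.Str.startswith l "- Type:" then (acc.1 ++ [acc.2], [l]) else (acc.1, acc.2 ++ [l])

-- pass 2: table-driven parse of one line (first matching prefix wins, as B's inner for/break)
def pvParseLine (d : PySem.Dict String String) (l : String) : PySem.Dict String String :=
  match pvFields.find? (fun pk => PySem.Str.startswith l pk.1) with
  | some pk => d.insert pk.2 (PySem.Str.strip (PySem.Str.replace l pk.1 ""))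
  | none => d

def pvParseBlock (b : List String) : PySem.Dict String String :=
  b.foldl pvParseLine PySem.Dict.empty

def parse_sources_from_text_py_alt (text : String) : List (List (String × String)) :=
  let lines := ((PySem.Str.split? (PySem.Str.strip text) "\n").getD []).map PySem.Str.strip
  let g := lines.foldl pvGroupStep ([], [])
  (((g.1 ++ [g.2]).map pvParseBlock).filter (fun d => d.items ≠ [])).map PySem.Dict.items

-- ===== PRECONDITION & SPEC =====
def Spec_parse_sources_from_text_py (text : String) (out : List (List (String × String))) : Prop := out = parse_sources_from_text_py_alt text
instance (text : String) (out : List (List (String × String))) : Decidable (Spec_parse_sources_from_text_py text out) := by unfold Spec_parse_sources_from_text_py; infer_instance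

-- ===== CLAIM (what is proved, stated in full; the proofs are below) =====
def Claim_equal_parse_sources_from_text_py : Prop := ∀ (text : String), Dom_parse_sources_from_text_py text → Spec_parse_sources_from_text_py text (parse_sources_from_text_py text)

-- ===== LEMMAS AND PROOFS =====

-- A's final flush and B's block-list → output
def pvFinishA (r : List (List (String × String)) × PySem.Dict String String) :
    List (List (String × String)) :=
  if r.2.items ≠ [] then r.1 ++ [r.2.items] else r.1

def pvToOut (bs : List (List String)) : List (List (String × String)) :=
  ((bs.map pvParseBlock).filter (fun d => d.items ≠ [])).map PySem.Dict.items

def pvFinishB (g : List (List String) × List String) : List (List (String × String)) :=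
  pvToOut (g.1 ++ [g.2])

lemma pvToOut_append_singleton (bs : List (List String)) (cur : List String) :
    pvToOut (bs ++ [cur]) =
      pvToOut bs ++ (if (pvParseBlock cur).items ≠ [] then [(pvParseBlock cur).items] else []) := by
  unfold pvToOut
  rw [List.map_append, List.filter_append, List.map_append]
  split <;> simp_all

lemma pvStepA_type (st : List (List (String × String)) × PySem.Dict String String) (l : String)
    (h1 : PySem.Str.startswith (PySem.Str.strip l) "- Type:" = true) :
    pvStepA st l = ((if st.2.items ≠ [] then st.1 ++ [st.2.items] else st.1),
      pvParseBlock [PySem.Str.strip l]) := by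
  unfold pvStepA pvParseBlock pvParseLine pvFields
  simp only [List.foldl_cons, List.foldl_nil, List.find?_cons, h1, if_true]

lemma pvStepA_nonType (st : List (List (String × String)) × PySem.Dict String String) (l : String)
    (h1 : PySem.Str.startswith (PySem.Str.strip l) "- Type:" = false) :
    pvStepA st l = (st.1, pvParseLine st.2 (PySem.Str.strip l)) := by
  unfold pvStepA pvParseLine pvFields
  simp only [List.find?_cons, h1, Bool.false_eq_true, if_false]
  cases h2 : PySem.Str.startswith (PySem.Str.strip l) "Description:" <;>
    cases h3 : PySem.Str.startswith (PySem.Str.strip l) "URL/Identifier:" <;>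
      cases h4 : PySem.Str.startswith (PySem.Str.strip l) "Accessibility:" <;>
        cases h5 : PySem.Str.startswith (PySem.Str.strip l) "Relevance:" <;> simp

lemma pvParseBlock_append_singleton (cur : List String) (l : String) :
    pvParseBlock (cur ++ [l]) = pvParseLine (pvParseBlock cur) l := by
  unfold pvParseBlock
  rw [List.foldl_append, List.foldl_cons, List.foldl_nil]

-- the loop invariant: A's stateful scan + final flush equals B's group-then-parse, for aligned states
lemma pvInv (lines : List String) (s : List (List (String × String)))
    (bs : List (List String)) (c : PySem.Dict String String) (cur : List String)
    (hs : s = pvToOut bs) (hc : c = pvParseBlock cur) :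
    pvFinishA (lines.foldl pvStepA (s, c))
      = pvFinishB ((lines.map PySem.Str.strip).foldl pvGroupStep (bs, cur)) := by
  induction lines generalizing s bs c cur with
  | nil =>
    unfold pvFinishA pvFinishB
    rw [List.foldl_nil, List.map_nil, List.foldl_nil, pvToOut_append_singleton, hs, hc]
    split <;> simp
  | cons l tl ih =>
    rw [List.foldl_cons, List.map_cons, List.foldl_cons]
    cases h1 : PySem.Str.startswith (PySem.Str.strip l) "- Type:" with
    | true =>
      rw [pvStepA_type _ _ h1]
      have hg : pvGroupStep (bs, cur) (PySem.Str.strip l) = (bs ++ [cur], [PySem.Str.strip l]) := by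
        unfold pvGroupStep; simp only [h1, if_true]
      rw [hg]
      exact ih _ _ _ _ (by rw [hs, hc, pvToOut_append_singleton]; split <;> simp_all) rfl
    | false =>
      rw [pvStepA_nonType _ _ h1]
      have hg : pvGroupStep (bs, cur) (PySem.Str.strip l) = (bs, cur ++ [PySem.Str.strip l]) := by
        unfold pvGroupStep; simp only [h1, Bool.false_eq_true, if_false]
      rw [hg]
      exact ih _ _ _ _ hs (by rw [hc, pvParseBlock_append_singleton])

-- ===== VERDICT (by name: the statement is the Claim_ definition above) =====
theorem parse_sources_from_text_py_spec : Claim_equal_parse_sources_from_text_py := by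
  intro text _
  show parse_sources_from_text_py text = parse_sources_from_text_py_alt text
  simp only [parse_sources_from_text_py, parse_sources_from_text_py_alt]
  exact pvInv _ [] [] PySem.Dict.empty [] rfl rfl
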